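-- pv_equiv track=rewrite | github.com/leetsolution/solutions | problems/3628-maximum-number-of-subsequences-after-one-inserting/solution.py | numOfSubsequences
-- ===== SOURCE A (Python) =====
-- def numOfSubsequences(s: str) -> int:
--     def count_subsequences(text):
--         l_count = 0
--         lc_count = 0
--         lct_count = 0
--         for char in text:
--             if char == 'L':
--                 l_count += 1
--             elif char == 'C':
--                 lc_count += l_count
--             elif char == 'T':
--                 lct_count += lc_count
--         return lct_count
--
--     max_count = 0
--     for i in range(len(s) + 1):
--         temp_s = s[:i] + 'L' + s[i:]
--         max_count = max(max_count, count_subsequences(temp_s))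
--
--         temp_s = s[:i] + 'C' + s[i:]
--         max_count = max(max_count, count_subsequences(temp_s))
--
--         temp_s = s[:i] + 'T' + s[i:]
--         max_count = max(max_count, count_subsequences(temp_s))
--
--     return max_count
-- ===== SOURCE B (Python) =====
-- def numOfSubsequences(s: str) -> int:
--     n = len(s)
--     # suf[i] = (number of 'T' in s[i:], number of 'CT' subsequence pairs in s[i:])
--     suf = [(0, 0)] * (n + 1)
--     t = ct = 0
--     for i in range(n - 1, -1, -1):
--         c = s[i]
--         if c == 'C':
--             ct += t
--         elif c == 'T':
--             t += 1
--         suf[i] = (t, ct)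
--     l = lc = lct = 0
--     best = 0
--     for i in range(n + 1):
--         t, ct = suf[i]
--         # gains: insert 'L' at i -> ct, insert 'C' at i -> l*t, insert 'T' at i -> lc
--         best = max(best, ct, l * t, lc)
--         if i < n:
--             c = s[i]
--             if c == 'L':
--                 l += 1
--             elif c == 'C':
--                 lc += l
--             elif c == 'T':
--                 lct += lc
--     return lct + best
-- ===== Notes on version B (the rewrite author's own statement) =====
-- stated objective: faster
-- what changed: A re-scans the whole string to recount LCT subsequences for every of the 3(n+1) candidate insertions (O(n^2)); B makes one backward pass building suffix (T, CT-pair) counts and one forward pass over prefix (L, LC, LCT) counts, computing each insertion's gain in O(1), so the best insertion is found in O(n).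
import Mathlib
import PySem

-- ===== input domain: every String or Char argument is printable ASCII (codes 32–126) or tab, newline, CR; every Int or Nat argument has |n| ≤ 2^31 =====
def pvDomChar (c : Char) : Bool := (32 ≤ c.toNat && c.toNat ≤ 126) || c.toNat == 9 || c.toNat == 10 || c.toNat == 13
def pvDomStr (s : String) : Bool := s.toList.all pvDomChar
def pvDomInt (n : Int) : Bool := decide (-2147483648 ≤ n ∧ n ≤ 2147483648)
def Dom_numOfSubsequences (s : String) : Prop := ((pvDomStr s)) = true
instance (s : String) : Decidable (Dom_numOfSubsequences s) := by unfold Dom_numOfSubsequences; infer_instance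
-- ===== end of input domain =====

-- B replaces A's try-every-insertion re-count (O(n^2)) by one suffix pass + one forward pass (O(n)).

-- ===== PORT A =====
-- the body of A's helper loop: state (l_count, lc_count, lct_count)
def stepA (st : Int × Int × Int) (c : Char) : Int × Int × Int :=
  if c = 'L' then (st.1 + 1, st.2.1, st.2.2)
  else if c = 'C' then (st.1, st.2.1 + st.1, st.2.2)
  else if c = 'T' then (st.1, st.2.1, st.2.2 + st.2.1)
  else st

-- count_subsequences
def countSub (t : List Char) : Int := (t.foldl stepA (0, 0, 0)).2.2

-- Python s[:i] / s[i:] = take i / drop i (exact here: i ranges over 0..len(s))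
def numOfSubsequences (s : String) : Int :=
  let cs := s.toList
  (List.range (cs.length + 1)).foldl (fun m i =>
    max (max (max m (countSub (cs.take i ++ 'L' :: cs.drop i)))
             (countSub (cs.take i ++ 'C' :: cs.drop i)))
        (countSub (cs.take i ++ 'T' :: cs.drop i))) 0

-- ===== PORT B =====
-- Source B's backward loop: suffix list, entry i = (#'T' in s[i:], #"CT" pairs in s[i:])
def sufArr : List Char → List (Int × Int)
  | [] => [(0, 0)]
  | c :: v =>
    let rest := sufArr v
    let p := rest.headD (0, 0)
    (p.1 + (if c = 'T' then 1 else 0), p.2 + (if c = 'C' then p.1 else 0)) :: rest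

-- Source B's forward loop: prefix state (l, lc, lct) and best single-insert gain
def goB : List Char → List (Int × Int) → Int → Int → Int → Int → Int
  | [], sufs, l, lc, lct, best =>
    let p := sufs.headD (0, 0)
    lct + max best (max (max p.2 (l * p.1)) lc)
  | c :: cs, sufs, l, lc, lct, best =>
    let p := sufs.headD (0, 0)
    let best' := max best (max (max p.2 (l * p.1)) lc)
    if c = 'L' then goB cs sufs.tail (l + 1) lc lct best'
    else if c = 'C' then goB cs sufs.tail l (lc + l) lct best'
    else if c = 'T' then goB cs sufs.tail l lc (lct + lc) best'
    else goB cs sufs.tail l lc lct best'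

def numOfSubsequences_alt (s : String) : Int :=
  goB s.toList (sufArr s.toList) 0 0 0 0

-- ===== PRECONDITION & SPEC =====
def Spec_numOfSubsequences (s : String) (out : Int) : Prop := out = numOfSubsequences_alt s
instance (s : String) (out : Int) : Decidable (Spec_numOfSubsequences s out) := by unfold Spec_numOfSubsequences; infer_instance

-- ===== CLAIM (what is proved, stated in full; the proofs are below) =====
def Claim_equal_numOfSubsequences : Prop := ∀ (s : String), Dom_numOfSubsequences s → Spec_numOfSubsequences s (numOfSubsequences s)

-- ===== LEMMAS AND PROOFS =====

-- subsequence-count functions used by the proofs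
def cL : List Char → Int
  | [] => 0
  | c :: v => (if c = 'L' then 1 else 0) + cL v
def cC : List Char → Int
  | [] => 0
  | c :: v => (if c = 'C' then 1 else 0) + cC v
def cT : List Char → Int
  | [] => 0
  | c :: v => (if c = 'T' then 1 else 0) + cT v
def cLC : List Char → Int
  | [] => 0
  | c :: v => (if c = 'L' then cC v else 0) + cLC v
def cCT : List Char → Int
  | [] => 0
  | c :: v => (if c = 'C' then cT v else 0) + cCT v
def cLCT : List Char → Int
  | [] => 0
  | c :: v => (if c = 'L' then cCT v else 0) + cLCT v

-- total LCT count of the full string, reconstructed from a prefix state and the suffix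
def TOT (v : List Char) (l lc lct : Int) : Int := lct + lc * cT v + l * cCT v + cLCT v
-- gain of the best single insertion at the current boundary
def gainAt (v : List Char) (l lc : Int) : Int := max (max (cCT v) (l * cT v)) lc
-- max gain over all boundaries of v (given prefix state l, lc)
def G : List Char → Int → Int → Int
  | [], l, lc => gainAt [] l lc
  | c :: v, l, lc =>
    max (gainAt (c :: v) l lc)
      (if c = 'L' then G v (l + 1) lc else if c = 'C' then G v l (lc + l) else G v l lc)

-- A's fold, rewritten per-boundary in terms of the count functions
def Asem (v : List Char) (l lc lct m : Int) : Int :=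
  (List.range (v.length + 1)).foldl (fun acc j =>
    max (max (max acc (TOT v l lc lct + cCT (v.drop j)))
             (TOT v l lc lct + (l + cL (v.take j)) * cT (v.drop j)))
        (TOT v l lc lct + (lc + l * cC (v.take j) + cLC (v.take j)))) m

lemma foldA (v : List Char) : ∀ l lc lct : Int,
    v.foldl stepA (l, lc, lct) =
      (l + cL v, lc + l * cC v + cLC v, lct + lc * cT v + l * cCT v + cLCT v) := by
  induction v with
  | nil => intro l lc lct; simp [cL, cC, cT, cLC, cCT, cLCT]
  | cons c v ih =>
    intro l lc lct
    rw [List.foldl_cons]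
    by_cases hL : c = 'L'
    · subst hL
      rw [show stepA (l, lc, lct) 'L' = (l + 1, lc, lct) from rfl, ih,
          show cL ('L' :: v) = 1 + cL v from rfl,
          show cC ('L' :: v) = 0 + cC v from rfl,
          show cT ('L' :: v) = 0 + cT v from rfl,
          show cLC ('L' :: v) = cC v + cLC v from rfl,
          show cCT ('L' :: v) = 0 + cCT v from rfl,
          show cLCT ('L' :: v) = cCT v + cLCT v from rfl]
      simp only [Prod.mk.injEq]
      refine ⟨by ring, by ring, by ring⟩
    · by_cases hC : c = 'C'
      · subst hC
        rw [show stepA (l, lc, lct) 'C' = (l, lc + l, lct) from rfl, ih,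
            show cL ('C' :: v) = 0 + cL v from rfl,
            show cC ('C' :: v) = 1 + cC v from rfl,
            show cT ('C' :: v) = 0 + cT v from rfl,
            show cLC ('C' :: v) = 0 + cLC v from rfl,
            show cCT ('C' :: v) = cT v + cCT v from rfl,
            show cLCT ('C' :: v) = 0 + cLCT v from rfl]
        simp only [Prod.mk.injEq]
        refine ⟨by ring, by ring, by ring⟩
      · by_cases hT : c = 'T'
        · subst hT
          rw [show stepA (l, lc, lct) 'T' = (l, lc, lct + lc) from rfl, ih,
              show cL ('T' :: v) = 0 + cL v from rfl,
              show cC ('T' :: v) = 0 + cC v from rfl,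
              show cT ('T' :: v) = 1 + cT v from rfl,
              show cLC ('T' :: v) = 0 + cLC v from rfl,
              show cCT ('T' :: v) = 0 + cCT v from rfl,
              show cLCT ('T' :: v) = 0 + cLCT v from rfl]
          simp only [Prod.mk.injEq]
          refine ⟨by ring, by ring, by ring⟩
        · have hs : stepA (l, lc, lct) c = (l, lc, lct) := by simp [stepA, hL, hC, hT]
          rw [hs, ih]
          simp only [cL, cC, cT, cLC, cCT, cLCT, if_neg hL, if_neg hC, if_neg hT,
            Prod.mk.injEq]
          refine ⟨by ring, by ring, by ring⟩

lemma cLCT_append (u v : List Char) :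
    cLCT (u ++ v) = cLCT u + cLC u * cT v + cL u * cCT v + cLCT v := by
  have h := foldA (u ++ v) 0 0 0
  rw [List.foldl_append, foldA, foldA] at h
  have := congrArg (fun p : Int × Int × Int => p.2.2) h
  simp at this
  linarith [this]

lemma countSub_ins (u v : List Char) (x : Char) :
    countSub (u ++ x :: v) =
      (List.foldl stepA (stepA (cL u, cLC u, cLCT u) x) v).2.2 := by
  simp [countSub, List.foldl_append, foldA]

lemma ins_L (u v : List Char) :
    countSub (u ++ 'L' :: v) = cLCT (u ++ v) + cCT v := by
  rw [countSub_ins, cLCT_append]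
  rw [show stepA (cL u, cLC u, cLCT u) 'L' = (cL u + 1, cLC u, cLCT u) from rfl, foldA]
  ring

lemma ins_C (u v : List Char) :
    countSub (u ++ 'C' :: v) = cLCT (u ++ v) + cL u * cT v := by
  rw [countSub_ins, cLCT_append]
  rw [show stepA (cL u, cLC u, cLCT u) 'C' = (cL u, cLC u + cL u, cLCT u) from rfl, foldA]
  ring

lemma ins_T (u v : List Char) :
    countSub (u ++ 'T' :: v) = cLCT (u ++ v) + cLC u := by
  rw [countSub_ins, cLCT_append]
  rw [show stepA (cL u, cLC u, cLCT u) 'T' = (cL u, cLC u, cLCT u + cLC u) from rfl, foldA]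
  ring

lemma A_eq_Asem (s : String) : numOfSubsequences s = Asem s.toList 0 0 0 0 := by
  unfold numOfSubsequences Asem
  refine List.foldl_ext _ _ 0 (fun acc j _ => ?_)
  have hsplit : s.toList.take j ++ s.toList.drop j = s.toList := List.take_append_drop j s.toList
  rw [ins_L, ins_C, ins_T, hsplit, TOT]
  ring_nf

lemma TOT_cons (c : Char) (v : List Char) (l lc lct : Int) :
    TOT (c :: v) l lc lct =
      if c = 'L' then TOT v (l + 1) lc lct
      else if c = 'C' then TOT v l (lc + l) lct
      else if c = 'T' then TOT v l lc (lct + lc)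
      else TOT v l lc lct := by
  by_cases hL : c = 'L'
  · subst hL
    rw [if_pos rfl, TOT, TOT,
        show cT ('L' :: v) = 0 + cT v from rfl,
        show cCT ('L' :: v) = 0 + cCT v from rfl,
        show cLCT ('L' :: v) = cCT v + cLCT v from rfl]
    ring
  · by_cases hC : c = 'C'
    · subst hC
      rw [if_neg hL, if_pos rfl, TOT, TOT,
          show cT ('C' :: v) = 0 + cT v from rfl,
          show cCT ('C' :: v) = cT v + cCT v from rfl,
          show cLCT ('C' :: v) = 0 + cLCT v from rfl]
      ring
    · by_cases hT : c = 'T'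
      · subst hT
        rw [if_neg hL, if_neg hC, if_pos rfl, TOT, TOT,
            show cT ('T' :: v) = 1 + cT v from rfl,
            show cCT ('T' :: v) = 0 + cCT v from rfl,
            show cLCT ('T' :: v) = 0 + cLCT v from rfl]
        ring
      · rw [if_neg hL, if_neg hC, if_neg hT, TOT, TOT]
        simp only [cT, cCT, cLCT, if_neg hL, if_neg hC, if_neg hT]
        ring

lemma TOT_cons' (c : Char) (v : List Char) (l lc lct : Int) :
    TOT (c :: v) l lc lct =
      TOT v (l + (if c = 'L' then 1 else 0)) (lc + (if c = 'C' then l else 0))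
        (lct + (if c = 'T' then lc else 0)) := by
  by_cases hL : c = 'L'
  · subst hL; rw [TOT_cons]; simp
  · by_cases hC : c = 'C'
    · subst hC; rw [TOT_cons]; simp
    · by_cases hT : c = 'T'
      · subst hT; rw [TOT_cons]; simp
      · rw [TOT_cons]; simp [hL, hC, hT]

lemma Asem_cons (c : Char) (v : List Char) (l lc lct m : Int) :
    Asem (c :: v) l lc lct m =
      Asem v (l + (if c = 'L' then 1 else 0)) (lc + (if c = 'C' then l else 0))
        (lct + (if c = 'T' then lc else 0))
        (max (max (max m (TOT (c :: v) l lc lct + cCT (c :: v)))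
                  (TOT (c :: v) l lc lct + l * cT (c :: v)))
             (TOT (c :: v) l lc lct + lc)) := by
  have hT := TOT_cons' c v l lc lct
  unfold Asem
  rw [show (c :: v).length + 1 = (v.length + 1) + 1 from by simp,
      List.range_succ_eq_map, List.foldl_cons, List.foldl_map]
  have hinit : max (max (max m (TOT (c :: v) l lc lct + cCT ((c :: v).drop 0)))
        (TOT (c :: v) l lc lct + (l + cL ((c :: v).take 0)) * cT ((c :: v).drop 0)))
        (TOT (c :: v) l lc lct + (lc + l * cC ((c :: v).take 0) + cLC ((c :: v).take 0)))
      = max (max (max m (TOT (c :: v) l lc lct + cCT (c :: v)))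
                 (TOT (c :: v) l lc lct + l * cT (c :: v)))
            (TOT (c :: v) l lc lct + lc) := by
    simp [cL, cC, cLC]
  rw [hinit]
  refine List.foldl_ext _ _ _ (fun acc j _ => ?_)
  rw [List.take_succ_cons, List.drop_succ_cons, hT]
  have h1 : l + cL (c :: v.take j) =
      (l + (if c = 'L' then 1 else 0)) + cL (v.take j) := by
    simp only [cL]; ring
  have h2 : lc + l * cC (c :: v.take j) + cLC (c :: v.take j) =
      (lc + (if c = 'C' then l else 0)) +
        (l + (if c = 'L' then 1 else 0)) * cC (v.take j) + cLC (v.take j) := by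
    by_cases hL : c = 'L'
    · subst hL; simp [cC, cLC]; ring
    · by_cases hC : c = 'C'
      · subst hC; simp [cC, cLC]; ring
      · simp only [cC, cLC, if_neg hL, if_neg hC]; ring
  rw [h1, h2]

lemma Asem_eq (v : List Char) : ∀ l lc lct m : Int,
    Asem v l lc lct m = max m (TOT v l lc lct + G v l lc) := by
  induction v with
  | nil =>
    intro l lc lct m
    simp [Asem, G, gainAt, TOT, cT, cCT, cLCT, cL, cC, cLC]
    generalize lct + lc * 0 + l * 0 + 0 = a
    omega
  | cons c v ih =>
    intro l lc lct m
    rw [Asem_cons, ih]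
    rw [show G (c :: v) l lc = max (gainAt (c :: v) l lc)
          (if c = 'L' then G v (l + 1) lc else if c = 'C' then G v l (lc + l)
           else G v l lc) from rfl]
    have hT := TOT_cons' c v l lc lct
    have hG : (if c = 'L' then G v (l + 1) lc else if c = 'C' then G v l (lc + l)
           else G v l lc) = G v (l + (if c = 'L' then 1 else 0)) (lc + (if c = 'C' then l else 0)) := by
      split_ifs <;> simp_all
    rw [hG, ← hT, gainAt]
    generalize TOT (c :: v) l lc lct = T
    generalize cCT (c :: v) = x
    generalize l * cT (c :: v) = y
    generalize G v (l + (if c = 'L' then 1 else 0)) (lc + (if c = 'C' then l else 0)) = g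
    omega

lemma sufArr_headD (v : List Char) : (sufArr v).headD (0, 0) = (cT v, cCT v) := by
  induction v with
  | nil => rfl
  | cons c v ih =>
    rw [show sufArr (c :: v) =
          (((sufArr v).headD (0, 0)).1 + (if c = 'T' then 1 else 0),
           ((sufArr v).headD (0, 0)).2 + (if c = 'C' then ((sufArr v).headD (0, 0)).1 else 0))
          :: sufArr v from rfl,
        List.headD_cons, ih]
    rw [show cT (c :: v) = (if c = 'T' then 1 else 0) + cT v from rfl,
        show cCT (c :: v) = (if c = 'C' then cT v else 0) + cCT v from rfl]
    simp only [Prod.mk.injEq]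
    refine ⟨by ring, by ring⟩

lemma sufArr_cons (c : Char) (v : List Char) :
    sufArr (c :: v) = (cT (c :: v), cCT (c :: v)) :: sufArr v := by
  rw [show sufArr (c :: v) =
        (((sufArr v).headD (0, 0)).1 + (if c = 'T' then 1 else 0),
         ((sufArr v).headD (0, 0)).2 + (if c = 'C' then ((sufArr v).headD (0, 0)).1 else 0))
        :: sufArr v from rfl,
      sufArr_headD]
  rw [show cT (c :: v) = (if c = 'T' then 1 else 0) + cT v from rfl,
      show cCT (c :: v) = (if c = 'C' then cT v else 0) + cCT v from rfl]
  simp only [List.cons.injEq, Prod.mk.injEq]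
  exact ⟨⟨by ring, by ring⟩, trivial⟩

lemma goB_eq (v : List Char) : ∀ l lc lct best : Int,
    goB v (sufArr v) l lc lct best = TOT v l lc lct + max best (G v l lc) := by
  induction v with
  | nil =>
    intro l lc lct best
    simp [goB, sufArr, TOT, G, gainAt, cT, cCT, cLCT]
  | cons c v ih =>
    intro l lc lct best
    rw [sufArr_cons]
    by_cases hL : c = 'L'
    · subst hL
      rw [show goB ('L' :: v) ((cT ('L' :: v), cCT ('L' :: v)) :: sufArr v) l lc lct best
            = goB v (sufArr v) (l + 1) lc lct
                (max best (max (max (cCT ('L' :: v)) (l * cT ('L' :: v))) lc)) from by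
          simp [goB],
        ih,
        show G ('L' :: v) l lc
            = max (max (max (cCT ('L' :: v)) (l * cT ('L' :: v))) lc) (G v (l + 1) lc) from rfl,
        show TOT ('L' :: v) l lc lct = TOT v (l + 1) lc lct from by rw [TOT_cons']; simp]
      generalize TOT v (l + 1) lc lct = T
      generalize cCT ('L' :: v) = x
      generalize l * cT ('L' :: v) = y
      generalize G v (l + 1) lc = g
      omega
    · by_cases hC : c = 'C'
      · subst hC
        rw [show goB ('C' :: v) ((cT ('C' :: v), cCT ('C' :: v)) :: sufArr v) l lc lct best
              = goB v (sufArr v) l (lc + l) lct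
                  (max best (max (max (cCT ('C' :: v)) (l * cT ('C' :: v))) lc)) from by
            simp [goB],
          ih,
          show G ('C' :: v) l lc
              = max (max (max (cCT ('C' :: v)) (l * cT ('C' :: v))) lc) (G v l (lc + l)) from rfl,
          show TOT ('C' :: v) l lc lct = TOT v l (lc + l) lct from by rw [TOT_cons']; simp]
        generalize TOT v l (lc + l) lct = T
        generalize cCT ('C' :: v) = x
        generalize l * cT ('C' :: v) = y
        generalize G v l (lc + l) = g
        omega
      · by_cases hT : c = 'T'
        · subst hT
          rw [show goB ('T' :: v) ((cT ('T' :: v), cCT ('T' :: v)) :: sufArr v) l lc lct best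
                = goB v (sufArr v) l lc (lct + lc)
                    (max best (max (max (cCT ('T' :: v)) (l * cT ('T' :: v))) lc)) from by
              simp [goB],
            ih,
            show G ('T' :: v) l lc
                = max (max (max (cCT ('T' :: v)) (l * cT ('T' :: v))) lc) (G v l lc) from rfl,
            show TOT ('T' :: v) l lc lct = TOT v l lc (lct + lc) from by rw [TOT_cons']; simp]
          generalize TOT v l lc (lct + lc) = T
          generalize cCT ('T' :: v) = x
          generalize l * cT ('T' :: v) = y
          generalize G v l lc = g
          omega
        · rw [show goB (c :: v) ((cT (c :: v), cCT (c :: v)) :: sufArr v) l lc lct best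
                = goB v (sufArr v) l lc lct
                    (max best (max (max (cCT (c :: v)) (l * cT (c :: v))) lc)) from by
              simp [goB, hL, hC, hT],
            ih,
            show G (c :: v) l lc
                = max (max (max (cCT (c :: v)) (l * cT (c :: v))) lc) (G v l lc) from by
              simp [G, gainAt, hL, hC],
            show TOT (c :: v) l lc lct = TOT v l lc lct from by
              rw [TOT_cons']; simp [hL, hC, hT]]
          generalize TOT v l lc lct = T
          generalize cCT (c :: v) = x
          generalize l * cT (c :: v) = y
          generalize G v l lc = g
          omega

lemma cT_nonneg (v : List Char) : 0 ≤ cT v := by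
  induction v with
  | nil => simp [cT]
  | cons c v ih => simp only [cT]; split <;> omega

lemma cCT_nonneg (v : List Char) : 0 ≤ cCT v := by
  induction v with
  | nil => simp [cCT]
  | cons c v ih =>
    have := cT_nonneg v
    simp only [cCT]; split <;> omega

lemma cLCT_nonneg (v : List Char) : 0 ≤ cLCT v := by
  induction v with
  | nil => simp [cLCT]
  | cons c v ih =>
    have := cCT_nonneg v
    simp only [cLCT]; split <;> omega

lemma G_nonneg (v : List Char) : ∀ l lc : Int, 0 ≤ G v l lc := by
  intro l lc
  have h : (0:Int) ≤ gainAt v l lc :=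
    le_trans (cCT_nonneg v) (le_trans (le_max_left _ _) (le_max_left _ _))
  cases v with
  | nil => exact h
  | cons c v => exact le_trans h (by rw [G]; exact le_max_left _ _)

-- ===== VERDICT (by name: the statement is the Claim_ definition above) =====
theorem numOfSubsequences_spec : Claim_equal_numOfSubsequences := by
  intro s _
  unfold Spec_numOfSubsequences numOfSubsequences_alt
  rw [A_eq_Asem, Asem_eq, goB_eq]
  have h1 : TOT s.toList 0 0 0 = cLCT s.toList := by simp [TOT]
  have h2 := cLCT_nonneg s.toList
  have h3 := G_nonneg s.toList 0 0
  rw [h1]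
  generalize cLCT s.toList = a at *
  generalize G s.toList 0 0 = g at *
  omega
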